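-- pv_equiv track=rewrite | github.com/JasonFeng365/BuildYourOwnLabyrinth | helper/MarkdownToHTML.py | replaceCode
-- ===== SOURCE A (Python) =====
-- codePrefix = "<code>"
--
-- suffix = "</code>"
--
-- def replaceCode(line):
-- 	stars = []
-- 	for i in range(len(line)):
-- 		if line[i]=='`': stars.append(i)
--
-- 	l = 0
-- 	count = 0
--
-- 	res = ""
-- 	for i in stars:
-- 		res += line[l:i]
-- 		count+=1
-- 		if count%2: res += codePrefix
-- 		else: res += suffix
-- 		l = i+1
-- 	res += line[l:]
-- 	return res
-- ===== SOURCE B (Python) =====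
-- def replaceCode(line):
-- 	out = []
-- 	opening = True
-- 	for ch in line:
-- 		if ch == '`':
-- 			out.append('<code>' if opening else '</code>')
-- 			opening = not opening
-- 		else:
-- 			out.append(ch)
-- 	return ''.join(out)
-- ===== Notes on version B (the rewrite author's own statement) =====
-- stated objective: simpler
-- what changed: B replaces A's two passes (collect all backtick indices, then re-slice the string between consecutive indices with a count%2 parity) by one direct pass over the characters with a boolean toggle, emitting each character or an alternating tag as it goes.
import Mathlib
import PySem

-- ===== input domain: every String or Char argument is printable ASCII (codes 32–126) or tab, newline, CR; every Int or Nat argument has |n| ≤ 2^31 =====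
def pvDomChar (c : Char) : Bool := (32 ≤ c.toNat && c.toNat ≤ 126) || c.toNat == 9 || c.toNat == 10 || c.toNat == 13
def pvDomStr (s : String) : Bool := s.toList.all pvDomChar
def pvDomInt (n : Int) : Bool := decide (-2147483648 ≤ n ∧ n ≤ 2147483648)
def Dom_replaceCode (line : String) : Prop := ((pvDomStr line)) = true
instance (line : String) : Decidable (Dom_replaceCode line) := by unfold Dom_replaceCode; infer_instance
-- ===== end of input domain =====

-- B is one direct pass with a boolean toggle instead of A's index-collection pass plus slicing pass; proved to return the same string.

-- ===== PORT A =====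
-- module constants of A
def codePrefix : String := "<code>"
def suffix : String := "</code>"

-- A's first loop: for i in range(len(line)): if line[i]=='`': stars.append(i)
def pvStars (cs : List Char) : List Int :=
  (PySem.List.pyRange 0 (cs.length : Int) 1).foldl
    (fun acc i => if PySem.List.pyGetD cs i ' ' = '`' then acc ++ [i] else acc) ([] : List Int)

-- A's second loop body: res += line[l:i]; count += 1; res += tag; l = i+1   (state = (l, count, res))
def pvStepA (cs : List Char) (st : Int × Int × List Char) (i : Int) : Int × Int × List Char :=
  let res := st.2.2 ++ PySem.List.slice cs (some st.1) (some i)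
  let count := st.2.1 + 1
  let res := if PySem.Int.mod count 2 ≠ 0 then res ++ codePrefix.toList else res ++ suffix.toList
  (i + 1, count, res)

def replaceCode (line : String) : String :=
  String.ofList
    (((pvStars line.toList).foldl (pvStepA line.toList) ((0 : Int), (0 : Int), ([] : List Char))).2.2
      ++ PySem.List.slice line.toList
           (some ((pvStars line.toList).foldl (pvStepA line.toList) ((0 : Int), (0 : Int), ([] : List Char))).1) none)

-- ===== PORT B =====
-- B's single loop body (state = (opening, out)); ''.join(out) is concatenation at the character level
def pvStepB (st : Bool × List Char) (ch : Char) : Bool × List Char :=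
  if ch = '`' then (!st.1, st.2 ++ (if st.1 then codePrefix.toList else suffix.toList))
  else (st.1, st.2 ++ [ch])

def replaceCode_alt (line : String) : String :=
  String.ofList (line.toList.foldl pvStepB (true, ([] : List Char))).2

-- ===== PRECONDITION & SPEC =====
def Spec_replaceCode (line : String) (out : String) : Prop := out = replaceCode_alt line
instance (line : String) (out : String) : Decidable (Spec_replaceCode line out) := by unfold Spec_replaceCode; infer_instance

-- ===== CLAIM (what is proved, stated in full; the proofs are below) =====
def Claim_equal_replaceCode : Prop := ∀ (line : String), Dom_replaceCode line → Spec_replaceCode line (replaceCode line)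

-- ===== LEMMAS AND PROOFS =====

-- structural indices of '`' in t, offset by n
def pvIdxs : List Char → Int → List Int
  | [], _ => []
  | c :: t, n => if c = '`' then n :: pvIdxs t (n + 1) else pvIdxs t (n + 1)

-- A's alternating core, driven by the running Int count
def pvCoreA : List Char → Int → List Char
  | [], _ => []
  | c :: t, k =>
    if c = '`' then
      (if PySem.Int.mod (k + 1) 2 ≠ 0 then codePrefix.toList else suffix.toList) ++ pvCoreA t (k + 1)
    else c :: pvCoreA t k

-- B's alternating core, driven by the toggle
def pvCoreB : List Char → Bool → List Char
  | [], _ => []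
  | c :: t, b =>
    if c = '`' then (if b then codePrefix.toList else suffix.toList) ++ pvCoreB t !b
    else c :: pvCoreB t b

lemma pvIdxs_tick (rest : List Char) (n : Int) :
    pvIdxs ('`' :: rest) n = n :: pvIdxs rest (n + 1) := by simp [pvIdxs]

lemma pvIdxs_ne {c : Char} (hc : c ≠ '`') (rest : List Char) (n : Int) :
    pvIdxs (c :: rest) n = pvIdxs rest (n + 1) := by simp [pvIdxs, hc]

lemma pvSlice_mid (q pend t : List Char) :
    PySem.List.slice (q ++ pend ++ t) (some (q.length : Int))
      (some ((q.length : Int) + (pend.length : Int))) = pend := by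
  rw [PySem.List.slice_toNat _ (by positivity) (by positivity)]
  have h1 : ((q.length : Int)).toNat = q.length := by omega
  have h2 : (((q.length : Int) + (pend.length : Int))).toNat = q.length + pend.length := by omega
  rw [h1, h2, Nat.add_sub_cancel_left, List.append_assoc, List.drop_left, List.take_left]

lemma pvStars_eq (t : List Char) : ∀ (pre : List Char) (acc : List Int),
    (PySem.List.pyRange (pre.length : Int) ((pre.length : Int) + (t.length : Int)) 1).foldl
      (fun a i => if PySem.List.pyGetD (pre ++ t) i ' ' = '`' then a ++ [i] else a) acc
    = acc ++ pvIdxs t (pre.length : Int) := by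
  induction t with
  | nil => intro pre acc; simp [PySem.List.pyRange_one_eq_nil, pvIdxs]
  | cons c rest ih =>
    intro pre acc
    have hlt : (pre.length : Int) < (pre.length : Int) + ((c :: rest).length : Int) := by
      simp only [List.length_cons]; push_cast; omega
    rw [PySem.List.pyRange_one_cons hlt]
    have hget : PySem.List.pyGetD (pre ++ c :: rest) (pre.length : Int) ' ' = c := by
      rw [PySem.List.pyGetD_eq_getElem _ ' ' (by positivity) (by simp)]
      simp
    have hrange : ((pre.length : Int) + 1) = (((pre ++ [c]).length : Int)) := by simp
    have hbound : (pre.length : Int) + ((c :: rest).length : Int)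
        = ((pre ++ [c]).length : Int) + (rest.length : Int) := by push_cast; simp; omega
    have happ : pre ++ c :: rest = (pre ++ [c]) ++ rest := by simp
    simp only [List.foldl_cons, hget]
    rw [hbound, hrange, happ, ih (pre ++ [c])]
    by_cases hc : c = '`'
    · subst hc
      rw [pvIdxs_tick]
      simp [← hrange]
    · rw [pvIdxs_ne hc]
      simp [hc, ← hrange]

lemma pvStars_def (cs : List Char) : pvStars cs = pvIdxs cs 0 := by
  have h := pvStars_eq cs [] []
  simpa using h

lemma pvFoldA_eq (t : List Char) : ∀ (q pend : List Char) (count : Int) (r0 : List Char)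
    (l n : Int), l = (q.length : Int) → n = (q.length : Int) + (pend.length : Int) →
    ((pvIdxs t n).foldl (pvStepA (q ++ pend ++ t)) (l, count, r0)).2.2
      ++ PySem.List.slice (q ++ pend ++ t)
           (some ((pvIdxs t n).foldl (pvStepA (q ++ pend ++ t)) (l, count, r0)).1) none
    = r0 ++ pend ++ pvCoreA t count := by
  induction t with
  | nil =>
    intro q pend count r0 l n hl hn
    simp only [pvIdxs, List.foldl_nil, pvCoreA]
    rw [hl, PySem.List.slice_from _ (by positivity)]
    have h1 : ((q.length : Int)).toNat = q.length := by omega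
    rw [h1, List.append_nil, List.drop_left]
    simp [List.append_assoc]
  | cons c rest ih =>
    intro q pend count r0 l n hl hn
    by_cases hc : c = '`'
    · subst hc
      rw [pvIdxs_tick, List.foldl_cons]
      have hstep : pvStepA (q ++ pend ++ '`' :: rest) (l, count, r0) n
          = (n + 1, count + 1,
             r0 ++ pend ++ (if PySem.Int.mod (count + 1) 2 ≠ 0 then codePrefix.toList else suffix.toList)) := by
        simp only [pvStepA, hl, hn]
        rw [pvSlice_mid]
        split_ifs <;> simp [List.append_assoc]
      rw [hstep]
      have happ : q ++ pend ++ '`' :: rest = (q ++ pend ++ ['`']) ++ [] ++ rest := by simp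
      rw [happ]
      rw [ih (q ++ pend ++ ['`']) [] (count + 1) _ (n + 1) (n + 1)
            (by simp [hn]; push_cast; ring) (by simp [hn]; push_cast; ring)]
      rw [pvCoreA]
      simp [List.append_assoc]
    · rw [pvIdxs_ne hc]
      have happ : q ++ pend ++ c :: rest = q ++ (pend ++ [c]) ++ rest := by simp
      rw [happ]
      rw [ih q (pend ++ [c]) count r0 l (n + 1) hl (by simp [hn]; push_cast; ring)]
      rw [pvCoreA]
      simp [hc, List.append_assoc]

lemma pvCoreA_eq_coreB (t : List Char) : ∀ (k : Int),
    pvCoreA t k = pvCoreB t (decide (PySem.Int.mod k 2 = 0)) := by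
  induction t with
  | nil => intro k; simp [pvCoreA, pvCoreB]
  | cons c rest ih =>
    intro k
    have hm : PySem.Int.mod k 2 = k % 2 := PySem.Int.mod_eq_emod_of_pos (by norm_num)
    have hm1 : PySem.Int.mod (k + 1) 2 = (k + 1) % 2 := PySem.Int.mod_eq_emod_of_pos (by norm_num)
    by_cases hc : c = '`'
    · subst hc
      rw [pvCoreA, pvCoreB, ih (k + 1)]
      have hb1 : (decide (PySem.Int.mod (k + 1) 2 = 0)) = !(decide (PySem.Int.mod k 2 = 0)) := by
        rw [hm, hm1]; by_cases hk : k % 2 = 0 <;> simp [hk] <;> omega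
      rw [hb1, hm1]
      by_cases hk : k % 2 = 0 <;> simp [hm, hk] <;> [skip; skip] <;> omega
    · simp [pvCoreA, pvCoreB, hc, ih k]

lemma pvFoldB_eq (t : List Char) : ∀ (b : Bool) (acc : List Char),
    (t.foldl pvStepB (b, acc)).2 = acc ++ pvCoreB t b := by
  induction t with
  | nil => intro b acc; simp [pvCoreB]
  | cons c rest ih =>
    intro b acc
    by_cases hc : c = '`' <;>
      simp [pvStepB, pvCoreB, hc, ih, List.append_assoc]

-- ===== VERDICT (by name: the statement is the Claim_ definition above) =====
theorem replaceCode_spec : Claim_equal_replaceCode := by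
  intro line _
  unfold Spec_replaceCode replaceCode replaceCode_alt
  rw [pvStars_def]
  have hfold := pvFoldA_eq line.toList [] [] 0 [] 0 0 (by simp) (by simp)
  simp only [List.length_nil, Nat.cast_zero, List.nil_append, zero_add] at hfold
  rw [hfold]
  rw [pvFoldB_eq line.toList true []]
  rw [pvCoreA_eq_coreB line.toList 0]
  norm_num
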